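-- pv_equiv track=rewrite | github.com/Danny7w7/CRMv2 | app/views/consents.py | getCompanyPerAgent
-- ===== SOURCE A (Python) =====
-- def getCompanyPerAgent(agent):
--     agent_upper = agent.upper()
--
--     if "GINA" in agent_upper or "LUIS" in agent_upper:
--         company = "TRUINSURANCE GROUP LLC"
--     elif any(substring in agent_upper for substring in ["DANIEL", "ZOHIRA", "DANIESKA", "VLADIMIR", "FRANK"]):
--         company = "LAPEIRA & ASSOCIATES LLC"
--     elif any(substring in agent_upper for substring in ["BORJA", "RODRIGO", "EVELYN"]):
--         company = "SECUREPLUS INSURANCE LLC"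
--     else:
--         company = ""  # Valor predeterminado si no hay coincidencia
--     return company
-- ===== SOURCE B (Python) =====
-- KEYWORDS = [
--     ("GINA", 0), ("LUIS", 0),
--     ("DANIEL", 1), ("ZOHIRA", 1), ("DANIESKA", 1), ("VLADIMIR", 1), ("FRANK", 1),
--     ("BORJA", 2), ("RODRIGO", 2), ("EVELYN", 2),
-- ]
-- COMPANIES = ["TRUINSURANCE GROUP LLC", "LAPEIRA & ASSOCIATES LLC", "SECUREPLUS INSURANCE LLC"]
--
-- def getCompanyPerAgent(agent):
--     # Single left-to-right scan over the string's positions, keeping the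
--     # minimum (= highest-priority) matched group index as an accumulator.
--     u = agent.upper()
--     best = None
--     for i in range(len(u)):
--         for kw, grp in KEYWORDS:
--             if u.startswith(kw, i) and (best is None or grp < best):
--                 best = grp
--     return "" if best is None else COMPANIES[best]
-- ===== Notes on version B (the rewrite author's own statement) =====
-- stated objective: alternative
-- what changed: Instead of running a per-keyword substring-search cascade, B makes a single left-to-right scan over the positions of the uppercased string, testing at each position which keyword starts there and keeping the minimum (highest-priority) matched group index in an accumulator, then maps that index into the company table.
import Mathlib
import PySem

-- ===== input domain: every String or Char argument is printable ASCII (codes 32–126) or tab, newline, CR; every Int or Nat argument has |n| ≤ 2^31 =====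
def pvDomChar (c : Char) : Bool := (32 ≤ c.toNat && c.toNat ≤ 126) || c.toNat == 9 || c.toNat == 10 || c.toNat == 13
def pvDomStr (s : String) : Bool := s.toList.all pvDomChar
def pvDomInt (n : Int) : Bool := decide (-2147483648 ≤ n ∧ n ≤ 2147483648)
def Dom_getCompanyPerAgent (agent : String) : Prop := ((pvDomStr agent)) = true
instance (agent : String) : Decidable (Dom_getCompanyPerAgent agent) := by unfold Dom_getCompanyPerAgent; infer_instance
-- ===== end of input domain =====

-- B replaces A's per-keyword substring-search cascade by a single left-to-right scan over
-- the string's positions that keeps the minimum matched group index (objective: alternative).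


-- ===== PORT A =====
def getCompanyPerAgent (agent : String) : String :=
  let agent_upper := PySem.Str.upper agent
  if PySem.Str.isIn "GINA" agent_upper || PySem.Str.isIn "LUIS" agent_upper then
    "TRUINSURANCE GROUP LLC"
  else if ["DANIEL", "ZOHIRA", "DANIESKA", "VLADIMIR", "FRANK"].any
      (fun substring => PySem.Str.isIn substring agent_upper) then
    "LAPEIRA & ASSOCIATES LLC"
  else if ["BORJA", "RODRIGO", "EVELYN"].any
      (fun substring => PySem.Str.isIn substring agent_upper) then
    "SECUREPLUS INSURANCE LLC"
  else
    ""

-- ===== PORT B =====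
-- KEYWORDS: ordered (keyword, group index) pairs, keywords as char lists
def pvKeywords : List (List Char × Nat) :=
  [("GINA".toList, 0), ("LUIS".toList, 0),
   ("DANIEL".toList, 1), ("ZOHIRA".toList, 1), ("DANIESKA".toList, 1),
   ("VLADIMIR".toList, 1), ("FRANK".toList, 1),
   ("BORJA".toList, 2), ("RODRIGO".toList, 2), ("EVELYN".toList, 2)]

def pvCompanies : List String :=
  ["TRUINSURANCE GROUP LLC", "LAPEIRA & ASSOCIATES LLC", "SECUREPLUS INSURANCE LLC"]

-- inner loop body: u.startswith(kw, i) for 0 ≤ i is exactly a prefix test on u.drop i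
def pvInner (u : List Char) (b : Option Nat) (i : Int) : Option Nat :=
  pvKeywords.foldl (fun b kg =>
    if PySem.Chars.startswith (u.drop i.toNat) kg.1 &&
       (match b with | none => true | some x => decide (kg.2 < x)) then some kg.2 else b) b

def getCompanyPerAgent_alt (agent : String) : String :=
  let u := (PySem.Str.upper agent).toList
  let best := (PySem.List.pyRange 0 u.length 1).foldl (pvInner u) none
  match best with
  | none => ""
  | some g => pvCompanies.getD g ""   -- COMPANIES[best]; best is a valid index by construction

-- ===== PRECONDITION & SPEC =====
def Spec_getCompanyPerAgent (agent : String) (out : String) : Prop := out = getCompanyPerAgent_alt agent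
instance (agent : String) (out : String) : Decidable (Spec_getCompanyPerAgent agent out) := by unfold Spec_getCompanyPerAgent; infer_instance

-- ===== CLAIM (what is proved, stated in full; the proofs are below) =====
def Claim_equal_getCompanyPerAgent : Prop := ∀ (agent : String), Dom_getCompanyPerAgent agent → Spec_getCompanyPerAgent agent (getCompanyPerAgent agent)

-- ===== LEMMAS AND PROOFS =====

-- option-min accumulator
def pvOmin (b : Option Nat) (g : Nat) : Option Nat :=
  some (match b with | none => g | some x => min x g)

-- the matched group indices, as a flat list over (position, keyword) pairs
def pvPairs (u : List Char) : List (Int × (List Char × Nat)) :=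
  (PySem.List.pyRange 0 u.length 1).flatMap (fun i => pvKeywords.map (Prod.mk i))

def pvC (u : List Char) (p : Int × (List Char × Nat)) : Bool :=
  PySem.Chars.startswith (u.drop p.1.toNat) p.2.1

def pvMat (u : List Char) : List Nat :=
  ((pvPairs u).filter (pvC u)).map (fun p => p.2.2)

theorem pvInner_step (u : List Char) (b : Option Nat) (i : Int) (kg : List Char × Nat) :
    (if PySem.Chars.startswith (u.drop i.toNat) kg.1 &&
        (match b with | none => true | some x => decide (kg.2 < x)) then some kg.2 else b)
      = (if pvC u (i, kg) then pvOmin b kg.2 else b) := by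
  cases b with
  | none => simp [pvC, pvOmin]
  | some x =>
      by_cases hm : PySem.Chars.startswith (u.drop i.toNat) kg.1 = true
      · by_cases hlt : kg.2 < x
        · simp [pvC, pvOmin, hm, hlt, Nat.min_eq_right (Nat.le_of_lt hlt)]
        · simp [pvC, pvOmin, hm, hlt, Nat.min_eq_left (Nat.le_of_not_lt hlt)]
      · simp [pvC, hm]

theorem foldl_filter_omin {α : Type} (c : α → Bool) (f : α → Nat) (l : List α) (b : Option Nat) :
    l.foldl (fun b x => if c x then pvOmin b (f x) else b) b
      = ((l.filter c).map f).foldl pvOmin b := by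
  induction l generalizing b with
  | nil => rfl
  | cons a l ih =>
    by_cases h : c a = true <;> simp [h, ih]

theorem foldl_omin_some (m : List Nat) (x : Nat) :
    m.foldl pvOmin (some x) = some (m.foldl min x) := by
  induction m generalizing x with
  | nil => rfl
  | cons a m ih => simp [pvOmin, ih]

theorem foldl_omin_none (m : List Nat) : m.foldl pvOmin none = m.min? := by
  cases m with
  | nil => rfl
  | cons a m => simp [pvOmin, foldl_omin_some, List.min?]

-- B's result, expressed through min? of the matched-groups list
theorem alt_eq_min? (agent : String) :
    getCompanyPerAgent_alt agent
      = (match (pvMat ((PySem.Str.upper agent).toList)).min? with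
         | none => ""
         | some g => pvCompanies.getD g "") := by
  have hfold : ∀ u : List Char,
      (PySem.List.pyRange 0 u.length 1).foldl (pvInner u) none = (pvMat u).min? := by
    intro u
    have hfun : ∀ i : Int, (fun (b : Option Nat) (kg : List Char × Nat) =>
        if PySem.Chars.startswith (u.drop i.toNat) kg.1 &&
           (match b with | none => true | some x => decide (kg.2 < x)) then some kg.2 else b)
        = (fun b kg => if pvC u (i, kg) then pvOmin b kg.2 else b) := by
      intro i; funext b kg; exact pvInner_step u b i kg
    have h1 : (PySem.List.pyRange 0 u.length 1).foldl (pvInner u) none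
        = (pvPairs u).foldl (fun b p => if pvC u p then pvOmin b p.2.2 else b) none := by
      rw [pvPairs, List.foldl_flatMap]
      have : pvInner u = fun b i =>
          (pvKeywords.map (Prod.mk i)).foldl (fun b p => if pvC u p then pvOmin b p.2.2 else b) b := by
        funext b i
        rw [pvInner, List.foldl_map, hfun i]
      rw [this]
    rw [h1, foldl_filter_omin, ← pvMat, foldl_omin_none]
  simp only [getCompanyPerAgent_alt, hfold]

theorem mem_pvMat_iff (u : List Char) (g : Nat) :
    g ∈ pvMat u ↔ ∃ kw : List Char, (kw, g) ∈ pvKeywords ∧ PySem.Chars.isIn kw u = true := by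
  constructor
  · rintro hg
    simp only [pvMat, List.mem_map, List.mem_filter, pvPairs, List.mem_flatMap,
      List.mem_map] at hg
    obtain ⟨p, ⟨⟨j, hj, ⟨kg, hkg, hpkg⟩⟩, hc⟩, hgeq⟩ := hg
    subst hpkg
    refine ⟨kg.1, by simpa [← hgeq] using hkg, ?_⟩
    rw [← PySem.Chars.exists_prefix_drop_iff_isIn]
    exact ⟨j.toNat, (PySem.Chars.startswith_iff _ _).1 hc⟩
  · rintro ⟨kw, hkw, hin⟩
    have hne : kw ≠ [] := by
      fin_cases hkw <;> simp
    obtain ⟨j, hpre⟩ := (PySem.Chars.exists_prefix_drop_iff_isIn kw u).2 hin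
    have hjlt : j < u.length := by
      by_contra hge
      rw [List.drop_eq_nil_of_le (Nat.le_of_not_lt hge)] at hpre
      exact hne (List.prefix_nil.mp hpre)
    simp only [pvMat, List.mem_map, List.mem_filter, pvPairs, List.mem_flatMap]
    refine ⟨((j : Int), (kw, g)), ⟨⟨(j : Int), ?_, ?_⟩, ?_⟩, rfl⟩
    · rw [PySem.List.mem_pyRange_one]
      exact ⟨Int.natCast_nonneg j, by exact_mod_cast hjlt⟩
    · simpa using hkw
    · simp only [pvC, Int.toNat_natCast]
      exact (PySem.Chars.startswith_iff _ _).2 hpre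

theorem mem_pvMat_lt (u : List Char) (g : Nat) (h : g ∈ pvMat u) : g < 3 := by
  obtain ⟨kw, hkw, -⟩ := (mem_pvMat_iff u g).1 h
  fin_cases hkw <;> omega

-- the three group-hit conditions, matching A's cascade
theorem mem_pvMat_zero (u : List Char) :
    0 ∈ pvMat u ↔ (PySem.Chars.isIn ['G','I','N','A'] u = true ∨ PySem.Chars.isIn ['L','U','I','S'] u = true) := by
  rw [mem_pvMat_iff]
  constructor
  · rintro ⟨kw, hkw, hin⟩
    simp [pvKeywords] at hkw
    rcases hkw with rfl | rfl <;> simp_all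
  · rintro (h | h)
    · exact ⟨"GINA".toList, by simp [pvKeywords], h⟩
    · exact ⟨"LUIS".toList, by simp [pvKeywords], h⟩

theorem mem_pvMat_one (u : List Char) :
    1 ∈ pvMat u ↔ (PySem.Chars.isIn ['D','A','N','I','E','L'] u = true ∨ PySem.Chars.isIn ['Z','O','H','I','R','A'] u = true
      ∨ PySem.Chars.isIn ['D','A','N','I','E','S','K','A'] u = true ∨ PySem.Chars.isIn ['V','L','A','D','I','M','I','R'] u = true
      ∨ PySem.Chars.isIn ['F','R','A','N','K'] u = true) := by
  rw [mem_pvMat_iff]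
  constructor
  · rintro ⟨kw, hkw, hin⟩
    simp [pvKeywords] at hkw
    rcases hkw with rfl | rfl | rfl | rfl | rfl <;> simp_all
  · rintro (h | h | h | h | h)
    · exact ⟨"DANIEL".toList, by simp [pvKeywords], h⟩
    · exact ⟨"ZOHIRA".toList, by simp [pvKeywords], h⟩
    · exact ⟨"DANIESKA".toList, by simp [pvKeywords], h⟩
    · exact ⟨"VLADIMIR".toList, by simp [pvKeywords], h⟩
    · exact ⟨"FRANK".toList, by simp [pvKeywords], h⟩

theorem mem_pvMat_two (u : List Char) :
    2 ∈ pvMat u ↔ (PySem.Chars.isIn ['B','O','R','J','A'] u = true ∨ PySem.Chars.isIn ['R','O','D','R','I','G','O'] u = true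
      ∨ PySem.Chars.isIn ['E','V','E','L','Y','N'] u = true) := by
  rw [mem_pvMat_iff]
  constructor
  · rintro ⟨kw, hkw, hin⟩
    simp [pvKeywords] at hkw
    rcases hkw with rfl | rfl | rfl <;> simp_all
  · rintro (h | h | h)
    · exact ⟨"BORJA".toList, by simp [pvKeywords], h⟩
    · exact ⟨"RODRIGO".toList, by simp [pvKeywords], h⟩
    · exact ⟨"EVELYN".toList, by simp [pvKeywords], h⟩

-- ===== VERDICT (by name: the statement is the Claim_ definition above) =====
theorem getCompanyPerAgent_spec : Claim_equal_getCompanyPerAgent := by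
  intro agent _
  show getCompanyPerAgent agent = getCompanyPerAgent_alt agent
  rw [alt_eq_min?]
  set u := (PySem.Str.upper agent).toList with hu
  by_cases h0 : 0 ∈ pvMat u
  · have hmin : (pvMat u).min? = some 0 := by
      rw [List.min?_eq_some_iff]
      exact ⟨h0, fun b _ => Nat.zero_le b⟩
    rw [hmin]
    have hc := (mem_pvMat_zero u).1 h0
    simp only [getCompanyPerAgent, PySem.Str.isIn_eq, ← hu]
    rcases hc with h | h <;> simp [h, pvCompanies]
  · by_cases h1 : 1 ∈ pvMat u
    · have hmin : (pvMat u).min? = some 1 := by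
        rw [List.min?_eq_some_iff]
        refine ⟨h1, fun b hb => ?_⟩
        rcases Nat.eq_zero_or_pos b with rfl | hpos
        · exact absurd hb h0
        · exact hpos
      rw [hmin]
      have hn0 := (mem_pvMat_zero u).not.1 h0
      have hc := (mem_pvMat_one u).1 h1
      push_neg at hn0
      simp only [getCompanyPerAgent, PySem.Str.isIn_eq, ← hu]
      rcases hc with h | h | h | h | h <;>
        simp [hn0.1, hn0.2, h, pvCompanies]
    · by_cases h2 : 2 ∈ pvMat u
      · have hmin : (pvMat u).min? = some 2 := by
          rw [List.min?_eq_some_iff]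
          refine ⟨h2, fun b hb => ?_⟩
          have : b ≠ 0 := fun e => h0 (e ▸ hb)
          have : b ≠ 1 := fun e => h1 (e ▸ hb)
          omega
        rw [hmin]
        have hn0 := (mem_pvMat_zero u).not.1 h0
        have hn1 := (mem_pvMat_one u).not.1 h1
        have hc := (mem_pvMat_two u).1 h2
        push_neg at hn0 hn1
        simp only [getCompanyPerAgent, PySem.Str.isIn_eq, ← hu]
        rcases hc with h | h | h <;>
          simp [hn0.1, hn0.2, hn1.1, hn1.2.1, hn1.2.2.1, hn1.2.2.2, h, pvCompanies]
      · have hmin : (pvMat u).min? = none := by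
          rw [List.min?_eq_none_iff]
          rw [List.eq_nil_iff_forall_not_mem]
          intro g hg
          have h3 := mem_pvMat_lt u g hg
          interval_cases g
          · exact h0 hg
          · exact h1 hg
          · exact h2 hg
        rw [hmin]
        have hn0 := (mem_pvMat_zero u).not.1 h0
        have hn1 := (mem_pvMat_one u).not.1 h1
        have hn2 := (mem_pvMat_two u).not.1 h2
        push_neg at hn0 hn1 hn2
        simp [getCompanyPerAgent, PySem.Str.isIn_eq, ← hu, hn0.1, hn0.2,
          hn1.1, hn1.2.1, hn1.2.2.1, hn1.2.2.2, hn2.1, hn2.2.1, hn2.2.2]
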